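-- pv_equiv track=rewrite | github.com/iconluxurygroup/service-distro-image-scraper | app/image_process.py | are_categories_related
-- ===== SOURCE A (Python) =====
-- category_hierarchy = {
--     "clothing": ["tops", "bottoms", "outerwear", "dresses","rtw","ready to wear"],
--     "tops": ["shirts", "vests"],
--     "shirts": ["t-shirts", "dress shirts"],
--     "vests": [],
--     "bottoms": ["pants"],
--     "pants": ["jeans", "trousers","chinos"],
--     "outerwear": ["jackets"],
--     "jackets": ["coats", "blazers"],
--     "dresses": [],
--     "footwear": ["shoes"],
--     "shoes": ["boots", "sneakers"],
--     "accessories": ["hats", "belts", "bags", "sunglasses"],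
--     "hats": ["caps", "beanies"],
--     "belts": [],
--     "bags": [],
--     "sunglasses": []
-- }
--
-- def are_categories_related(category1: str, category2: str) -> bool:
--     """Check if two categories are related in the hierarchy."""
--     category1 = category1.lower().strip()
--     category2 = category2.lower().strip()
--     if category1 == category2:
--         return True
--     for parent, children in category_hierarchy.items():
--         if category1 in children and category2 in children:
--             return True
--         if (category1 == parent and category2 in children) or (category2 == parent and category1 in children):
--             return True
--     return False
-- ===== SOURCE B (Python) =====
-- category_hierarchy = {
--     "clothing": ["tops", "bottoms", "outerwear", "dresses","rtw","ready to wear"],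
--     "tops": ["shirts", "vests"],
--     "shirts": ["t-shirts", "dress shirts"],
--     "vests": [],
--     "bottoms": ["pants"],
--     "pants": ["jeans", "trousers","chinos"],
--     "outerwear": ["jackets"],
--     "jackets": ["coats", "blazers"],
--     "dresses": [],
--     "footwear": ["shoes"],
--     "shoes": ["boots", "sneakers"],
--     "accessories": ["hats", "belts", "bags", "sunglasses"],
--     "hats": ["caps", "beanies"],
--     "belts": [],
--     "bags": [],
--     "sunglasses": []
-- }
--
-- # Reverse index built once: child -> parent (each child occurs under exactly one parent).
-- parent_of = {child: parent
--              for parent, children in category_hierarchy.items()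
--              for child in children}
--
-- def are_categories_related(category1: str, category2: str) -> bool:
--     """Check if two categories are related in the hierarchy."""
--     category1 = category1.lower().strip()
--     category2 = category2.lower().strip()
--     if category1 == category2:
--         return True
--     p1 = parent_of.get(category1)
--     p2 = parent_of.get(category2)
--     return (p1 is not None and p1 == p2) or p1 == category2 or p2 == category1
-- ===== Notes on version B (the rewrite author's own statement) =====
-- stated objective: idiomatic
-- what changed: Replaces the per-call linear scan over all hierarchy entries with constant-time lookups in a child-to-parent reverse index built once at module load.
import Mathlib
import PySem

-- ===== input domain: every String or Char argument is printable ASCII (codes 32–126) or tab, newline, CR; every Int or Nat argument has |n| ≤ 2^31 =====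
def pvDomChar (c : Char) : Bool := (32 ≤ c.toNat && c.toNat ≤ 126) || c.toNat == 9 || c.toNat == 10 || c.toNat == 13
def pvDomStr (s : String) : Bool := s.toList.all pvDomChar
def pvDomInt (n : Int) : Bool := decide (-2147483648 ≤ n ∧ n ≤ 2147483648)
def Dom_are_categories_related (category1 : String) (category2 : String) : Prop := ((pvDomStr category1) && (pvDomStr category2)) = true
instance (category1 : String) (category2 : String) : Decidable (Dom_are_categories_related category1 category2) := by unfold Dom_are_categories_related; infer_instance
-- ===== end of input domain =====

-- B replaces A's per-call linear scan of the whole hierarchy by two lookups in a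
-- child→parent reverse index built once (idiomatic; same return value everywhere).

-- ===== PORT A =====
-- the module-level constant category_hierarchy (dict of str -> list[str], insertion order)
def categoryHierarchy : List (String × List String) :=
  [ ("clothing", ["tops", "bottoms", "outerwear", "dresses", "rtw", "ready to wear"]),
    ("tops", ["shirts", "vests"]),
    ("shirts", ["t-shirts", "dress shirts"]),
    ("vests", []),
    ("bottoms", ["pants"]),
    ("pants", ["jeans", "trousers", "chinos"]),
    ("outerwear", ["jackets"]),
    ("jackets", ["coats", "blazers"]),
    ("dresses", []),
    ("footwear", ["shoes"]),
    ("shoes", ["boots", "sneakers"]),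
    ("accessories", ["hats", "belts", "bags", "sunglasses"]),
    ("hats", ["caps", "beanies"]),
    ("belts", []),
    ("bags", []),
    ("sunglasses", []) ]

-- A's 'for parent, children in category_hierarchy.items(): …' loop, step for step
def arcLoop (category1 category2 : String) : List (String × List String) → Bool
  | [] => false
  | (parent, children) :: rest =>
    if children.contains category1 && children.contains category2 then true
    else if (category1 == parent && children.contains category2)
            || (category2 == parent && children.contains category1) then true
    else arcLoop category1 category2 rest

def are_categories_related (category1 : String) (category2 : String) : Bool :=
  let c1 := PySem.Str.strip (PySem.Str.lower category1)
  let c2 := PySem.Str.strip (PySem.Str.lower category2)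
  if c1 == c2 then true
  else arcLoop c1 c2 categoryHierarchy

-- ===== PORT B =====
-- parent_of = {child: parent for parent, children in category_hierarchy.items() for child in children}
def parentOf : PySem.Dict String String :=
  categoryHierarchy.foldl
    (fun d pc => pc.2.foldl (fun d child => d.insert child pc.1) d)
    PySem.Dict.empty

def are_categories_related_alt (category1 : String) (category2 : String) : Bool :=
  let c1 := PySem.Str.strip (PySem.Str.lower category1)
  let c2 := PySem.Str.strip (PySem.Str.lower category2)
  if c1 == c2 then true
  else
    let p1 := parentOf.get? c1
    let p2 := parentOf.get? c2
    (p1.isSome && p1 == p2) || p1 == some c2 || p2 == some c1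

-- ===== PRECONDITION & SPEC =====
def Spec_are_categories_related (category1 : String) (category2 : String) (out : Bool) : Prop := out = are_categories_related_alt category1 category2
instance (category1 : String) (category2 : String) (out : Bool) : Decidable (Spec_are_categories_related category1 category2 out) := by unfold Spec_are_categories_related; infer_instance

-- ===== CLAIM (what is proved, stated in full; the proofs are below) =====
def Claim_equal_are_categories_related : Prop := ∀ (category1 : String) (category2 : String), Dom_are_categories_related category1 category2 → Spec_are_categories_related category1 category2 (are_categories_related category1 category2)

-- ===== LEMMAS AND PROOFS =====

-- the flattened child→parent association list underlying parent_of
def plOf (l : List (String × List String)) : List (String × String) :=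
  l.flatMap (fun pc => pc.2.map (fun child => (child, pc.1)))

-- first-match association lookup, oriented like Dict.get? on a literal dict
def lookupP (s : String) : List (String × String) → Option String
  | [] => none
  | (c, p) :: rest => if c == s then some p else lookupP s rest

theorem lookupP_map_append (s p : String) (ch : List String) (z : List (String × String)) :
    lookupP s (ch.map (fun c => (c, p)) ++ z)
      = if s ∈ ch then some p else lookupP s z := by
  induction ch with
  | nil => rfl
  | cons c cs ih =>
    simp only [List.map_cons, List.cons_append, lookupP, ih]
    by_cases h : c = s
    · subst h; simp
    · simp [beq_iff_eq, h, Ne.symm h]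

theorem lookupP_eq_none_of_not_mem (s : String) (z : List (String × String))
    (h : s ∉ z.map Prod.fst) : lookupP s z = none := by
  induction z with
  | nil => rfl
  | cons q rest ih =>
    obtain ⟨c, p⟩ := q
    simp only [List.map_cons, List.mem_cons, not_or] at h
    have hc : (c == s) = false := by
      simp only [beq_eq_false_iff_ne]; exact fun hh => h.1 hh.symm
    simp [lookupP, hc, ih h.2]

theorem lookupP_mem_snd (s q : String) (z : List (String × String))
    (h : lookupP s z = some q) : q ∈ z.map Prod.snd := by
  induction z with
  | nil => simp [lookupP] at h
  | cons e rest ih =>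
    obtain ⟨c, p⟩ := e
    by_cases hc : (c == s) = true
    · simp [lookupP, hc] at h; simp [h]
    · simp only [lookupP, hc, Bool.false_eq_true, ite_false] at h
      simp [ih h]

theorem mem_snd_plOf (q : String) (l : List (String × List String))
    (h : q ∈ (plOf l).map Prod.snd) : q ∈ l.map Prod.fst := by
  induction l with
  | nil => simp [plOf] at h
  | cons e rest ih =>
    obtain ⟨p, ch⟩ := e
    simp only [plOf, List.flatMap_cons, List.map_append, List.mem_append] at h
    rcases h with h | h
    · simp only [List.map_map, List.mem_map] at h
      obtain ⟨c, _, hc⟩ := h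
      simp [← hc]
    · exact List.mem_cons_of_mem _ (ih h)

-- B's decision rule, phrased over the assoc list
def coreRel (a b : String) (l : List (String × List String)) : Bool :=
  let p1 := lookupP a (plOf l)
  let p2 := lookupP b (plOf l)
  (p1.isSome && p1 == p2) || p1 == some b || p2 == some a

-- keys of plOf cons split as children ++ keys of tail
theorem map_fst_plOf_cons (p : String) (ch : List String) (rest : List (String × List String)) :
    (plOf ((p, ch) :: rest)).map Prod.fst = ch ++ (plOf rest).map Prod.fst := by
  simp [plOf, List.map_map, Function.comp_def]

-- MAIN LEMMA: A's scan equals B's two-lookup rule, given that every child occurs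
-- under exactly one parent and parent names are distinct (true of the literal hierarchy).
theorem arcLoop_eq_coreRel (a b : String) (l : List (String × List String))
    (hk : ((plOf l).map Prod.fst).Nodup) (hp : (l.map Prod.fst).Nodup) :
    arcLoop a b l = coreRel a b l := by
  induction l with
  | nil => rfl
  | cons e rest ih =>
    obtain ⟨p, ch⟩ := e
    rw [map_fst_plOf_cons] at hk
    have hkrest : ((plOf rest).map Prod.fst).Nodup := hk.of_append_right
    have hdisj : ∀ x ∈ ch, x ∉ (plOf rest).map Prod.fst :=
      fun x hx => (List.disjoint_of_nodup_append hk) hx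
    have hp2 : (p :: rest.map Prod.fst).Nodup := by simpa using hp
    have hp' := List.nodup_cons.mp hp2
    have ihr := ih hkrest hp'.2
    have hlkp : ∀ s, lookupP s (plOf ((p, ch) :: rest))
        = if s ∈ ch then some p else lookupP s (plOf rest) := by
      intro s
      simpa [plOf, List.flatMap_cons] using lookupP_map_append s p ch (plOf rest)
    -- p is never a parent value coming from the tail index
    have hptail : ∀ s q, lookupP s (plOf rest) = some q → q ≠ p := by
      intro s q hs hq
      exact hp'.1 (hq ▸ mem_snd_plOf q rest (lookupP_mem_snd s q _ hs))
    by_cases hca : a ∈ ch <;> by_cases hcb : b ∈ ch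
    · -- both in children: siblings in this entry
      simp [arcLoop, coreRel, hlkp, hca, hcb]
    · -- a in children, b not
      have hna : lookupP a (plOf rest) = none :=
        lookupP_eq_none_of_not_mem a _ (hdisj a hca)
      by_cases hbp : b = p
      · subst hbp
        simp [arcLoop, coreRel, hlkp, hca, hcb]
      · have hpb : (p == b) = false := by
          simp only [beq_eq_false_iff_ne]; exact fun hh => hbp hh.symm
        cases hres : lookupP b (plOf rest) with
        | none => simp [arcLoop, coreRel, hlkp, hca, hcb, hbp, hna, hres, hpb, ihr]
        | some q =>
          have hpq : (p == q) = false := by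
            simp only [beq_eq_false_iff_ne]; exact fun hh => hptail b q hres hh.symm
          simp [arcLoop, coreRel, hlkp, hca, hcb, hbp, hna, hres, hpb, hpq, ihr]
    · -- b in children, a not
      have hnb : lookupP b (plOf rest) = none :=
        lookupP_eq_none_of_not_mem b _ (hdisj b hcb)
      by_cases hap : a = p
      · subst hap
        simp [arcLoop, coreRel, hlkp, hca, hcb]
      · have hpa : (p == a) = false := by
          simp only [beq_eq_false_iff_ne]; exact fun hh => hap hh.symm
        cases hres : lookupP a (plOf rest) with
        | none => simp [arcLoop, coreRel, hlkp, hca, hcb, hap, hnb, hres, hpa, ihr]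
        | some q =>
          have hqp : (q == p) = false := by
            simp only [beq_eq_false_iff_ne]; exact hptail a q hres
          simp [arcLoop, coreRel, hlkp, hca, hcb, hap, hnb, hres, hpa, hqp, ihr]
    · -- neither in children: this entry is irrelevant
      simp [arcLoop, coreRel, hca, hcb, hlkp, ihr]

-- get? on the empty literal dict
theorem get?_mk_nil (s : String) : (PySem.Dict.mk ([] : List (String × String))).get? s = none := rfl

-- the computed dict parent_of agrees with first-match lookup in the flattened list
theorem parentOf_get?_eq (s : String) : parentOf.get? s = lookupP s (plOf categoryHierarchy) := by
  have h : parentOf = PySem.Dict.mk (plOf categoryHierarchy) := by decide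
  rw [h]
  simp [plOf, categoryHierarchy, PySem.Dict.get?_mk_cons, lookupP, get?_mk_nil]

theorem hk_lit : ((plOf categoryHierarchy).map Prod.fst).Nodup := by decide
theorem hp_lit : (categoryHierarchy.map Prod.fst).Nodup := by decide

-- ===== VERDICT (by name: the statement is the Claim_ definition above) =====
theorem are_categories_related_spec : Claim_equal_are_categories_related := by
  intro category1 category2 _
  unfold Spec_are_categories_related are_categories_related are_categories_related_alt
  simp only [parentOf_get?_eq]
  by_cases h : PySem.Str.strip (PySem.Str.lower category1) == PySem.Str.strip (PySem.Str.lower category2)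
  · simp [h]
  · simp only [h, Bool.false_eq_true, if_false]
    exact arcLoop_eq_coreRel _ _ categoryHierarchy hk_lit hp_lit
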